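-- pv_equiv track=rewrite | github.com/lallenfrancisl/learn-python | python-classes-and-inheritance/final_assesment.py | getPossibleLetters
-- ===== SOURCE A (Python) =====
-- VOWEL_COST = 250
--
-- LETTERS = 'ABCDEFGHIJKLMNOPQRSTUVWXYZ'
--
-- VOWELS = 'AEIOU'
--
-- def getPossibleLetters(guessed):
--     result = ''
--
--     for letter in LETTERS:
--         if letter not in guessed:
--             if VOWEL_COST == 250:
--                 if letter not in VOWELS:
--                     result = result + letter
--
--             else:
--                 result = result + letter
--
--     return result
-- ===== SOURCE B (Python) =====
-- VOWEL_COST = 250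
--
-- LETTERS = 'ABCDEFGHIJKLMNOPQRSTUVWXYZ'
--
-- VOWELS = 'AEIOU'
--
-- def getPossibleLetters(guessed):
--     return ''.join(sorted(set(LETTERS) - set(VOWELS) - set(guessed)))
-- ===== Notes on version B (the rewrite author's own statement) =====
-- stated objective: simpler
-- what changed: Replaces A's per-letter loop over the alphabet with nested membership ifs by declarative set algebra: set(LETTERS) - set(VOWELS) - set(guessed), then one sorted pass joined into the result string.
import Mathlib
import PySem

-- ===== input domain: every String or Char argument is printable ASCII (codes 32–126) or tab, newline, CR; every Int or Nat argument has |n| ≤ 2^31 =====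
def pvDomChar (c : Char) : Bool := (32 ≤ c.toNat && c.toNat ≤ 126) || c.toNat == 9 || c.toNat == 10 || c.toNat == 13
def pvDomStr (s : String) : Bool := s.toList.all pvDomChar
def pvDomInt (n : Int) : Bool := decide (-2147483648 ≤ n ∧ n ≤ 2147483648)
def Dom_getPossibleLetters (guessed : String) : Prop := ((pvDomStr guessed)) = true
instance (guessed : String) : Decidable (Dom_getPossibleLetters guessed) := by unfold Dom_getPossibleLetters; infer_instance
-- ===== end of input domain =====

-- B replaces A's per-letter loop with nested membership tests by set algebra
-- (set(LETTERS) - set(VOWELS) - set(guessed)) followed by one sorted pass; objective: simpler.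

def pvVOWEL_COST : Int := 250
def pvLETTERS : List Char := "ABCDEFGHIJKLMNOPQRSTUVWXYZ".toList
def pvVOWELS : List Char := "AEIOU".toList

-- ===== PORT A =====
def getPossibleLetters (guessed : String) : String :=
  String.ofList (pvLETTERS.foldl (fun result letter =>
    if !(guessed.toList.contains letter) then
      if pvVOWEL_COST == 250 then
        if !(pvVOWELS.contains letter) then result ++ [letter] else result
      else result ++ [letter]
    else result) [])

-- ===== PORT B =====
def getPossibleLetters_alt (guessed : String) : String :=
  String.ofList (PySem.List.sorted
    (PySem.Set.diff
      (PySem.Set.diff (PySem.Set.ofList pvLETTERS) (PySem.Set.ofList pvVOWELS))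
      (PySem.Set.ofList guessed.toList))
    (fun c => c))

-- ===== PRECONDITION & SPEC =====
def Spec_getPossibleLetters (guessed : String) (out : String) : Prop := out = getPossibleLetters_alt guessed
instance (guessed : String) (out : String) : Decidable (Spec_getPossibleLetters guessed out) := by unfold Spec_getPossibleLetters; infer_instance

-- ===== CLAIM (what is proved, stated in full; the proofs are below) =====
def Claim_equal_getPossibleLetters : Prop := ∀ (guessed : String), Dom_getPossibleLetters guessed → Spec_getPossibleLetters guessed (getPossibleLetters guessed)

-- ===== LEMMAS AND PROOFS =====

-- the consonant list both programs start from before removing guessed letters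
def pvConsonants : List Char := "BCDFGHJKLMNPQRSTVWXYZ".toList

theorem pv_ofList_letters : PySem.Set.ofList pvLETTERS = pvLETTERS :=
  PySem.Set.ofList_eq_self_of_nodup _ (by decide)

theorem pv_ofList_vowels : PySem.Set.ofList pvVOWELS = pvVOWELS :=
  PySem.Set.ofList_eq_self_of_nodup _ (by decide)

theorem pv_setdiff_letters_vowels : PySem.Set.diff pvLETTERS pvVOWELS = pvConsonants := by
  decide

theorem pv_consonants_filter :
    pvLETTERS.filter (fun c => !(pvVOWELS.contains c)) = pvConsonants := by
  decide

theorem pv_consonants_pairwise_lt : pvConsonants.Pairwise (· < ·) := by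
  decide

theorem pv_A_as_filter (guessed : String) :
    getPossibleLetters guessed =
      String.ofList (pvLETTERS.filter
        (fun c => !(guessed.toList.contains c) && !(pvVOWELS.contains c))) := by
  unfold getPossibleLetters
  have hbody : (fun (result : List Char) (letter : Char) =>
      if !(guessed.toList.contains letter) then
        if pvVOWEL_COST == 250 then
          if !(pvVOWELS.contains letter) then result ++ [letter] else result
        else result ++ [letter]
      else result)
      = (fun result letter =>
        if (!(guessed.toList.contains letter) && !(pvVOWELS.contains letter)) = true
        then result ++ [(fun c : Char => c) letter] else result) := by
    funext result letter
    simp only [pvVOWEL_COST]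
    by_cases h1 : letter ∈ guessed.toList <;>
      by_cases h2 : letter ∈ pvVOWELS <;> simp [h1, h2]
  rw [hbody, PySem.List.foldl_append_if]
  simp

theorem pv_B_as_filter (guessed : String) :
    getPossibleLetters_alt guessed =
      String.ofList (pvConsonants.filter (fun c => !(guessed.toList.contains c))) := by
  unfold getPossibleLetters_alt
  rw [pv_ofList_letters, pv_ofList_vowels, pv_setdiff_letters_vowels]
  have hdiff : PySem.Set.diff pvConsonants (PySem.Set.ofList guessed.toList)
      = pvConsonants.filter (fun c => !(guessed.toList.contains c)) := by
    unfold PySem.Set.diff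
    apply List.filter_congr
    intro x _
    by_cases h : x ∈ guessed.toList
    · simp [h, PySem.Set.mem_ofList]
    · simp [h, PySem.Set.mem_ofList]
  rw [hdiff]
  rw [PySem.List.sorted_eq_self_of_pairwise]
  exact ((pv_consonants_pairwise_lt.filter _).imp (fun h => le_of_lt h))

-- ===== VERDICT (by name: the statement is the Claim_ definition above) =====
theorem getPossibleLetters_spec : Claim_equal_getPossibleLetters := by
  intro guessed _
  unfold Spec_getPossibleLetters
  rw [pv_A_as_filter, pv_B_as_filter, ← pv_consonants_filter, List.filter_filter]
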